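-- pv_equiv track=rewrite | github.com/MaxCorpOrg/site-control-kit | scripts/export_telegram_members_non_pii.py | _dedupe_members
-- ===== SOURCE A (Python) =====
-- def _dedupe_members(members: list[dict[str, str]]) -> list[dict[str, str]]:
--     merged: dict[str, dict[str, str]] = {}
--     order: list[str] = []
--     for item in members:
--         peer_id = str(item.get("peer_id", "")).strip()
--         username = str(item.get("username", "—")).strip()
--         name = str(item.get("name", "")).strip()
--         dedupe_key = peer_id or f"{username.lower()}::{name.lower()}"
--         if dedupe_key not in merged:
--             merged[dedupe_key] = {
--                 "peer_id": peer_id or "—",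
--                 "name": name or "—",
--                 "username": username or "—",
--                 "status": str(item.get("status", "—")) or "—",
--                 "role": str(item.get("role", "—")) or "—",
--             }
--             order.append(dedupe_key)
--             continue
--
--         current = merged[dedupe_key]
--         if current.get("username") == "—" and username and username != "—":
--             current["username"] = username
--         if current.get("role") == "—" and item.get("role") and item.get("role") != "—":
--             current["role"] = str(item["role"])
--         if current.get("status") == "—" and item.get("status") and item.get("status") != "—":
--             current["status"] = str(item["status"])
--
--     return [merged[key] for key in order]
-- ===== SOURCE B (Python) =====
-- def _dedupe_members(members: list[dict[str, str]]) -> list[dict[str, str]]: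
--     # Different decomposition: for each FIRST occurrence of a dedupe key, build the
--     # merged record in one shot — every fillable field is "seed, or else the first
--     # acceptable candidate among later items with the same key" — no mutable merge dict.
--     def _key(item):
--         peer_id = str(item.get("peer_id", "")).strip()
--         username = str(item.get("username", "—")).strip()
--         name = str(item.get("name", "")).strip()
--         return peer_id or f"{username.lower()}::{name.lower()}"
--
--     def _pick(seed, cands):
--         if seed != "—":
--             return seed
--         for v in cands:
--             if v and v != "—":
--                 return v
--         return "—"
--
--     keyed = [(_key(it), it) for it in members]
--     out = []
--     seen = []
--     for pos, (k, first) in enumerate(keyed):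
--         if k in seen:
--             continue
--         seen.append(k)
--         rest = [it for k2, it in keyed[pos + 1:] if k2 == k]
--         peer_id = str(first.get("peer_id", "")).strip()
--         name = str(first.get("name", "")).strip()
--         username = str(first.get("username", "—")).strip()
--         out.append({
--             "peer_id": peer_id or "—",
--             "name": name or "—",
--             "username": _pick(username or "—",
--                               [str(it.get("username", "—")).strip() for it in rest]),
--             "status": _pick(str(first.get("status", "—")) or "—",
--                             [str(it.get("status") or "") for it in rest]),
--             "role": _pick(str(first.get("role", "—")) or "—",
--                           [str(it.get("role") or "") for it in rest]),
--         })
--     return out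
-- ===== Notes on version B (the rewrite author's own statement) =====
-- stated objective: alternative
-- what changed: A merges on the fly, mutating an already-inserted record inside a key->record dict while scanning; B keys each item once, then for each first occurrence of a key builds the merged record in one shot, computing each fillable field independently as 'seed, else first acceptable candidate among later same-key items' with no mutable merge state.
import Mathlib
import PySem

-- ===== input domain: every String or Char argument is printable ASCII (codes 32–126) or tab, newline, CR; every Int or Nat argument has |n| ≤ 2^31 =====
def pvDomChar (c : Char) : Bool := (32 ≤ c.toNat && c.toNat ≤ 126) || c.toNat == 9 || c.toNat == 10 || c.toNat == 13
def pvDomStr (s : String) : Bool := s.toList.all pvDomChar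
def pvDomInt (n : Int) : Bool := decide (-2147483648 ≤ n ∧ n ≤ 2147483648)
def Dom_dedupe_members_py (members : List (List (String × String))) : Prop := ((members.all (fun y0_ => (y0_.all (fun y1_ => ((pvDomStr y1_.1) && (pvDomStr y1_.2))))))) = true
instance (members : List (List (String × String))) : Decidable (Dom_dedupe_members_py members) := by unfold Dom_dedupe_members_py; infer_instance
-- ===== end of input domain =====

-- B replaces A's mutating merge dict by an independent computation per first occurrence:
-- each fillable field is "seed, else the first acceptable candidate among later same-key items".

-- ===== PORT A =====
-- A's per-item computations, as in the loop body of _dedupe_members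
-- (values of `item` are str already, so str() is the identity):
-- dedupe_key = peer_id or f"{username.lower()}::{name.lower()}"
def pvKeyA (item : List (String × String)) : String :=
  let peer_id := PySem.Str.strip ((PySem.Dict.mk item).getD "peer_id" "")
  let username := PySem.Str.strip ((PySem.Dict.mk item).getD "username" "—")
  let name := PySem.Str.strip ((PySem.Dict.mk item).getD "name" "")
  if peer_id = "" then PySem.Str.lower username ++ "::" ++ PySem.Str.lower name else peer_id

-- the fresh record A stores for a new dedupe key (`x or "—"` = if x = "" then "—" else x)
def pvInitA (item : List (String × String)) : PySem.Dict String String :=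
  let peer_id := PySem.Str.strip ((PySem.Dict.mk item).getD "peer_id" "")
  let username := PySem.Str.strip ((PySem.Dict.mk item).getD "username" "—")
  let name := PySem.Str.strip ((PySem.Dict.mk item).getD "name" "")
  let status := (PySem.Dict.mk item).getD "status" "—"
  let role := (PySem.Dict.mk item).getD "role" "—"
  PySem.Dict.mk [("peer_id", if peer_id = "" then "—" else peer_id),
                 ("name", if name = "" then "—" else name),
                 ("username", if username = "" then "—" else username),
                 ("status", if status = "" then "—" else status),
                 ("role", if role = "" then "—" else role)]

-- A's three fill-if-still-"—" updates on the existing record `current`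
-- (item.get(k) is None-falsy when missing: the match's none branch)
def pvFillA (cur : PySem.Dict String String) (item : List (String × String)) : PySem.Dict String String :=
  let username := PySem.Str.strip ((PySem.Dict.mk item).getD "username" "—")
  let c1 := if cur.get? "username" = some "—" ∧ username ≠ "" ∧ username ≠ "—" then
              cur.insert "username" username else cur
  let c2 := match (PySem.Dict.mk item).get? "role" with
            | some r => if c1.get? "role" = some "—" ∧ r ≠ "" ∧ r ≠ "—" then c1.insert "role" r else c1
            | none => c1
  match (PySem.Dict.mk item).get? "status" with
  | some s => if c2.get? "status" = some "—" ∧ s ≠ "" ∧ s ≠ "—" then c2.insert "status" s else c2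
  | none => c2

-- A's loop body: state = (merged, order); mutating `current` in place = overwrite at the same key
def pvStepA (st : PySem.Dict String (PySem.Dict String String) × List String)
    (item : List (String × String)) :
    PySem.Dict String (PySem.Dict String String) × List String :=
  let dedupe_key := pvKeyA item
  if st.1.contains dedupe_key = false then
    (st.1.insert dedupe_key (pvInitA item), st.2 ++ [dedupe_key])
  else
    let current := (st.1.get? dedupe_key).getD PySem.Dict.empty  -- merged[dedupe_key]; the key is present here
    (st.1.insert dedupe_key (pvFillA current item), st.2)

def dedupe_members_py (members : List (List (String × String))) : List (List (String × String)) :=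
  let st := members.foldl pvStepA (PySem.Dict.empty, [])
  -- return [merged[key] for key in order]
  st.2.map (fun key => ((st.1.get? key).getD PySem.Dict.empty).items)

-- ===== PORT B =====
-- B's dedupe key (the helper _key in Source B)
def pvKeyB (item : List (String × String)) : String :=
  let peer_id := PySem.Str.strip ((PySem.Dict.mk item).getD "peer_id" "")
  let username := PySem.Str.strip ((PySem.Dict.mk item).getD "username" "—")
  let name := PySem.Str.strip ((PySem.Dict.mk item).getD "name" "")
  if peer_id = "" then PySem.Str.lower username ++ "::" ++ PySem.Str.lower name else peer_id

-- Source B's _pick: the seed if it is already filled, else the first truthy non-"—" candidate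
def pvPickB (seed : String) (cands : List String) : String :=
  if seed ≠ "—" then seed
  else match cands.find? (fun v => v != "" && v != "—") with
       | some v => v
       | none => "—"

-- the record Source B appends for a first occurrence: first item + later same-key items
def pvRecB (first : List (String × String)) (rest : List (List (String × String))) :
    List (String × String) :=
  let d := PySem.Dict.mk first
  let peer_id := PySem.Str.strip (d.getD "peer_id" "")
  let name := PySem.Str.strip (d.getD "name" "")
  let username := PySem.Str.strip (d.getD "username" "—")
  [("peer_id", if peer_id = "" then "—" else peer_id),
   ("name", if name = "" then "—" else name),
   ("username", pvPickB (if username = "" then "—" else username)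
      (rest.map (fun it => PySem.Str.strip ((PySem.Dict.mk it).getD "username" "—")))),
   ("status", pvPickB (let s := d.getD "status" "—"; if s = "" then "—" else s)
      (rest.map (fun it => (PySem.Dict.mk it).getD "status" ""))),
   ("role", pvPickB (let r := d.getD "role" "—"; if r = "" then "—" else r)
      (rest.map (fun it => (PySem.Dict.mk it).getD "role" "")))]

-- Source B's main loop over `keyed` with the `seen` list (keyed[pos+1:] = the tail here)
def pvLoopB (seen : List String) :
    List (String × List (String × String)) → List (List (String × String))
  | [] => []
  | (k, first) :: tl =>
    if k ∈ seen then pvLoopB seen tl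
    else pvRecB first ((tl.filter (fun p => p.1 == k)).map Prod.snd) :: pvLoopB (seen ++ [k]) tl

def dedupe_members_py_alt (members : List (List (String × String))) : List (List (String × String)) :=
  pvLoopB [] (members.map (fun it => (pvKeyB it, it)))

-- ===== PRECONDITION & SPEC =====
def Spec_dedupe_members_py (members : List (List (String × String))) (out : List (List (String × String))) : Prop := out = dedupe_members_py_alt members
instance (members : List (List (String × String))) (out : List (List (String × String))) : Decidable (Spec_dedupe_members_py members out) := by unfold Spec_dedupe_members_py; infer_instance

-- ===== CLAIM =====
def Claim_equal_dedupe_members_py : Prop := ∀ (members : List (List (String × String))), Dom_dedupe_members_py members → Spec_dedupe_members_py members (dedupe_members_py members)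

-- ===== LEMMAS AND PROOFS =====

theorem pvKeyBA : pvKeyB = pvKeyA := rfl

-- ---- A-side characterisation (loop invariant of A's fold) ----

-- the merged record a whole group folds to (empty group ↦ junk, never used)
def pvFold (g : List (List (String × String))) : PySem.Dict String String :=
  match g with
  | [] => PySem.Dict.empty
  | first :: rest => rest.foldl pvFillA (pvInitA first)

theorem pvFold_append (g : List (List (String × String))) (x : List (String × String)) (h : g ≠ []) :
    pvFold (g ++ [x]) = pvFillA (pvFold g) x := by
  cases g with
  | nil => exact absurd rfl h
  | cons f r => simp [pvFold, List.foldl_append]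

theorem filter_key_ne_nil (l : List (List (String × String))) (c : String)
    (h : c ∈ l.map pvKeyA) : l.filter (fun it => pvKeyA it == c) ≠ [] := by
  obtain ⟨it, hit, hk⟩ := List.mem_map.mp h
  exact List.ne_nil_of_mem (List.mem_filter.mpr ⟨hit, by simp [hk]⟩)

theorem filter_key_nil (l : List (List (String × String))) (c : String)
    (h : c ∉ l.map pvKeyA) : l.filter (fun it => pvKeyA it == c) = [] := by
  rw [List.filter_eq_nil_iff]
  intro it hit hk
  exact h (List.mem_map.mpr ⟨it, hit, by simpa using hk⟩)

theorem set_ofList_append_mem {k : String} {ys : List String} (h : k ∈ ys) :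
    PySem.Set.ofList (ys ++ [k]) = PySem.Set.ofList ys := by
  rw [PySem.Set.ofList_eq_foldl, List.foldl_append, ← PySem.Set.ofList_eq_foldl]
  have hmem : k ∈ PySem.Set.ofList ys := (PySem.Set.mem_ofList ys k).mpr h
  simp [PySem.Set.add, PySem.Set.contains, hmem]

theorem set_ofList_append_not_mem {k : String} {ys : List String} (h : k ∉ ys) :
    PySem.Set.ofList (ys ++ [k]) = PySem.Set.ofList ys ++ [k] := by
  rw [PySem.Set.ofList_eq_foldl, List.foldl_append, ← PySem.Set.ofList_eq_foldl]
  have hmem : k ∉ PySem.Set.ofList ys := fun hk => h ((PySem.Set.mem_ofList ys k).mp hk)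
  simp [PySem.Set.add, PySem.Set.contains, hmem]

theorem pvStepA_of_contains (st : PySem.Dict String (PySem.Dict String String) × List String)
    (item : List (String × String)) (h : st.1.contains (pvKeyA item) = true) :
    pvStepA st item =
      (st.1.insert (pvKeyA item)
        (pvFillA ((st.1.get? (pvKeyA item)).getD PySem.Dict.empty) item), st.2) := by
  simp [pvStepA, h]

theorem pvStepA_of_not_contains (st : PySem.Dict String (PySem.Dict String String) × List String)
    (item : List (String × String)) (h : st.1.contains (pvKeyA item) = false) :
    pvStepA st item = (st.1.insert (pvKeyA item) (pvInitA item), st.2 ++ [pvKeyA item]) := by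
  simp [pvStepA, h]

theorem pvA_inv (l : List (List (String × String))) :
    (l.foldl pvStepA (PySem.Dict.empty, [])).2 = PySem.Set.ofList (l.map pvKeyA) ∧
    ∀ c, (l.foldl pvStepA (PySem.Dict.empty, [])).1.get? c =
      if c ∈ l.map pvKeyA then some (pvFold (l.filter (fun it => pvKeyA it == c))) else none := by
  induction l using List.reverseRecOn with
  | nil => exact ⟨rfl, fun c => by simp [PySem.Dict.get?_empty]⟩
  | append_singleton l x ih =>
    obtain ⟨ho, hm⟩ := ih
    simp only [List.foldl_append, List.foldl_cons, List.foldl_nil]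
    set S := l.foldl pvStepA (PySem.Dict.empty, []) with hS
    by_cases hmem : pvKeyA x ∈ l.map pvKeyA
    · -- the key was seen before: A's else-branch fills the existing record
      have hc : S.1.contains (pvKeyA x) = true := by
        rw [PySem.Dict.contains_eq_isSome_get?, hm (pvKeyA x), if_pos hmem]; rfl
      have hcur : (S.1.get? (pvKeyA x)).getD PySem.Dict.empty =
          pvFold (l.filter (fun it => pvKeyA it == pvKeyA x)) := by
        rw [hm (pvKeyA x), if_pos hmem, Option.getD_some]
      rw [pvStepA_of_contains S x hc]
      constructor
      · show S.2 = PySem.Set.ofList ((l ++ [x]).map pvKeyA)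
        rw [ho, List.map_append, List.map_cons, List.map_nil]
        exact (set_ofList_append_mem hmem).symm
      · intro c
        show (S.1.insert (pvKeyA x)
            (pvFillA ((S.1.get? (pvKeyA x)).getD PySem.Dict.empty) x)).get? c = _
        rw [hcur, PySem.Dict.get?_insert]
        by_cases hck : c = pvKeyA x
        · subst hck
          rw [if_pos rfl, List.filter_append, if_pos (by simp [List.map_append])]
          have hfx : List.filter (fun it => pvKeyA it == pvKeyA x) [x] = [x] := by
            simp
          rw [hfx, pvFold_append _ _ (filter_key_ne_nil l (pvKeyA x) hmem)]
        · have hkc : pvKeyA x ≠ c := fun h => hck h.symm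
          have hfx : List.filter (fun it => pvKeyA it == c) [x] = [] := by
            simp [hkc]
          rw [if_neg hck, hm c, List.filter_append, hfx, List.append_nil]
          by_cases h : c ∈ l.map pvKeyA
          · rw [if_pos h, if_pos (by simp [List.map_append, h])]
          · rw [if_neg h, if_neg (by simp [List.map_append, h, hck])]
    · -- a fresh key: A's then-branch inserts the seeded record and appends to order
      have hc : S.1.contains (pvKeyA x) = false := by
        rw [PySem.Dict.contains_eq_isSome_get?, hm (pvKeyA x), if_neg hmem]; rfl
      rw [pvStepA_of_not_contains S x hc]
      constructor
      · show S.2 ++ [pvKeyA x] = PySem.Set.ofList ((l ++ [x]).map pvKeyA)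
        rw [ho, List.map_append, List.map_cons, List.map_nil]
        exact (set_ofList_append_not_mem hmem).symm
      · intro c
        show (S.1.insert (pvKeyA x) (pvInitA x)).get? c = _
        rw [PySem.Dict.get?_insert]
        by_cases hck : c = pvKeyA x
        · subst hck
          rw [if_pos rfl, List.filter_append, if_pos (by simp [List.map_append])]
          have hfx : List.filter (fun it => pvKeyA it == pvKeyA x) [x] = [x] := by
            simp
          rw [hfx, filter_key_nil l (pvKeyA x) hmem, List.nil_append]
          rfl
        · have hkc : pvKeyA x ≠ c := fun h => hck h.symm
          have hfx : List.filter (fun it => pvKeyA it == c) [x] = [] := by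
            simp [hkc]
          rw [if_neg hck, hm c, List.filter_append, hfx, List.append_nil]
          by_cases h : c ∈ l.map pvKeyA
          · rw [if_pos h, if_pos (by simp [List.map_append, h])]
          · rw [if_neg h, if_neg (by simp [List.map_append, h, hck])]

-- ---- B-side characterisation ----

-- the keys Source B's loop processes (in order), given `seen`
def pvNewKeys (seen : List String) : List String → List String
  | [] => []
  | k :: tl => if k ∈ seen then pvNewKeys seen tl else k :: pvNewKeys (seen ++ [k]) tl

theorem mem_pvNewKeys {c : String} : ∀ {ks s : List String}, c ∈ pvNewKeys s ks → c ∉ s := by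
  intro ks
  induction ks with
  | nil => intro s h; simp [pvNewKeys] at h
  | cons k tl ih =>
    intro s h
    by_cases hk : k ∈ s
    · exact ih (by simpa [pvNewKeys, hk] using h)
    · rcases (by simpa [pvNewKeys, hk] using h : c = k ∨ c ∈ pvNewKeys (s ++ [k]) tl) with h | h
      · exact h ▸ hk
      · intro hc; exact ih h (by simp [hc])

theorem foldl_add_eq_append_pvNewKeys : ∀ (ks s : List String),
    ks.foldl PySem.Set.add s = s ++ pvNewKeys s ks := by
  intro ks
  induction ks with
  | nil => intro s; simp [pvNewKeys]
  | cons k tl ih =>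
    intro s
    by_cases hk : k ∈ s
    · simp [pvNewKeys, hk, PySem.Set.add, PySem.Set.contains, ih s]
    · simp [pvNewKeys, hk, PySem.Set.add, PySem.Set.contains, ih (s ++ [k])]

theorem pvNewKeys_nil_eq_ofList (ks : List String) :
    pvNewKeys [] ks = PySem.Set.ofList ks := by
  rw [PySem.Set.ofList_eq_foldl, foldl_add_eq_append_pvNewKeys ks []]; rfl

-- merge of one keyed group (first occurrence + its later items)
def pvGroupMerge (g : List (String × List (String × String))) : List (String × String) :=
  match g with
  | [] => []
  | (_, x) :: tl => pvRecB x (tl.map Prod.snd)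

theorem pvLoopB_eq : ∀ (l : List (String × List (String × String))) (s : List String),
    pvLoopB s l = (pvNewKeys s (l.map Prod.fst)).map
      (fun c => pvGroupMerge (l.filter (fun p => p.1 == c))) := by
  intro l
  induction l with
  | nil => intro s; simp [pvLoopB, pvNewKeys]
  | cons p tl ih =>
    intro s
    obtain ⟨k, x⟩ := p
    by_cases hk : k ∈ s
    · rw [show pvLoopB s ((k, x) :: tl) = pvLoopB s tl from by simp [pvLoopB, hk]]
      rw [ih s, List.map_cons, show pvNewKeys s (k :: tl.map Prod.fst) = pvNewKeys s (tl.map Prod.fst) from by simp [pvNewKeys, hk]]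
      apply List.map_congr_left
      intro c hc
      have hck : k ≠ c := fun h => mem_pvNewKeys hc (h ▸ hk)
      simp [hck]
    · rw [show pvLoopB s ((k, x) :: tl) =
          pvRecB x ((tl.filter (fun p => p.1 == k)).map Prod.snd) :: pvLoopB (s ++ [k]) tl from by
        simp [pvLoopB, hk]]
      rw [ih (s ++ [k]), List.map_cons,
        show pvNewKeys s (k :: tl.map Prod.fst) =
          k :: pvNewKeys (s ++ [k]) (tl.map Prod.fst) from by simp [pvNewKeys, hk]]
      rw [List.map_cons]
      congr 1
      · simp [pvGroupMerge]
      · apply List.map_congr_left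
        intro c hc
        have hck : k ≠ c := fun h => mem_pvNewKeys hc (by simp [h])
        simp [hck]

-- ---- the per-field fill algebra: A's fold of fills = B's first-match pick ----

def pvCandU (it : List (String × String)) : String :=
  PySem.Str.strip ((PySem.Dict.mk it).getD "username" "—")
def pvCandS (it : List (String × String)) : String := (PySem.Dict.mk it).getD "status" ""
def pvCandR (it : List (String × String)) : String := (PySem.Dict.mk it).getD "role" ""

def pvFill1 (cand : List (String × String) → String) (v : String) (it : List (String × String)) : String :=
  if v = "—" ∧ cand it ≠ "" ∧ cand it ≠ "—" then cand it else v

-- one A-fill step on a record with the five literal keys, fieldwise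
theorem pvFillA_mk5 (p n u s r : String) (it : List (String × String)) :
    pvFillA (PySem.Dict.mk [("peer_id", p), ("name", n), ("username", u), ("status", s), ("role", r)]) it =
      PySem.Dict.mk [("peer_id", p), ("name", n), ("username", pvFill1 pvCandU u it),
                     ("status", pvFill1 pvCandS s it), ("role", pvFill1 pvCandR r it)] := by
  have gu : ∀ a b c d e : String, (PySem.Dict.mk [("peer_id",a),("name",b),("username",c),("status",d),("role",e)]).get? "username" = some c := by
    intro a b c d e; simp [PySem.Dict.get?_mk_cons]
  have gs : ∀ a b c d e : String, (PySem.Dict.mk [("peer_id",a),("name",b),("username",c),("status",d),("role",e)]).get? "status" = some d := by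
    intro a b c d e; simp [PySem.Dict.get?_mk_cons]
  have gr : ∀ a b c d e : String, (PySem.Dict.mk [("peer_id",a),("name",b),("username",c),("status",d),("role",e)]).get? "role" = some e := by
    intro a b c d e; simp [PySem.Dict.get?_mk_cons]
  have iu : ∀ a b c d e v : String, (PySem.Dict.mk [("peer_id",a),("name",b),("username",c),("status",d),("role",e)]).insert "username" v = PySem.Dict.mk [("peer_id",a),("name",b),("username",v),("status",d),("role",e)] := by
    intro a b c d e v; apply PySem.Dict.ext; simp [PySem.Dict.items_insert, PySem.Dict.contains_mk]
  have ist : ∀ a b c d e v : String, (PySem.Dict.mk [("peer_id",a),("name",b),("username",c),("status",d),("role",e)]).insert "status" v = PySem.Dict.mk [("peer_id",a),("name",b),("username",c),("status",v),("role",e)] := by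
    intro a b c d e v; apply PySem.Dict.ext; simp [PySem.Dict.items_insert, PySem.Dict.contains_mk]
  have ir : ∀ a b c d e v : String, (PySem.Dict.mk [("peer_id",a),("name",b),("username",c),("status",d),("role",e)]).insert "role" v = PySem.Dict.mk [("peer_id",a),("name",b),("username",c),("status",d),("role",v)] := by
    intro a b c d e v; apply PySem.Dict.ext; simp [PySem.Dict.items_insert, PySem.Dict.contains_mk]
  simp only [pvFillA]
  rw [show PySem.Str.strip ((PySem.Dict.mk it).getD "username" "—") = pvCandU it from rfl]
  rw [gu p n u s r]
  have eU : (if some u = some "—" ∧ pvCandU it ≠ "" ∧ pvCandU it ≠ "—"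
             then (PySem.Dict.mk [("peer_id",p),("name",n),("username",u),("status",s),("role",r)]).insert "username" (pvCandU it)
             else PySem.Dict.mk [("peer_id",p),("name",n),("username",u),("status",s),("role",r)])
          = PySem.Dict.mk [("peer_id",p),("name",n),("username", pvFill1 pvCandU u it),("status",s),("role",r)] := by
    unfold pvFill1
    by_cases h : u = "—" ∧ pvCandU it ≠ "" ∧ pvCandU it ≠ "—"
    · rw [if_pos ⟨congrArg some h.1, h.2⟩, if_pos h, iu]
    · rw [if_neg (fun hh => h ⟨Option.some.inj hh.1, hh.2⟩), if_neg h]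
  rw [eU]
  generalize pvFill1 pvCandU u it = u'
  cases hR : (PySem.Dict.mk it).get? "role"
  · -- role absent: A leaves the record; B's candidate is "" and fails the filter
    dsimp only
    have hr0 : pvFill1 pvCandR r it = r := by
      unfold pvFill1
      rw [if_neg]
      rintro ⟨-, h1, -⟩
      exact h1 (by unfold pvCandR; rw [PySem.Dict.getD_eq_get?_getD, hR]; rfl)
    rw [hr0]
    cases hS : (PySem.Dict.mk it).get? "status"
    · dsimp only
      have hs0 : pvFill1 pvCandS s it = s := by
        unfold pvFill1
        rw [if_neg]
        rintro ⟨-, h1, -⟩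
        exact h1 (by unfold pvCandS; rw [PySem.Dict.getD_eq_get?_getD, hS]; rfl)
      rw [hs0]
    · rename_i vs
      dsimp only
      have hvs : pvCandS it = vs := by
        unfold pvCandS; rw [PySem.Dict.getD_eq_get?_getD, hS]; rfl
      have eS : (if (PySem.Dict.mk [("peer_id",p),("name",n),("username",u'),("status",s),("role",r)]).get? "status" = some "—" ∧ vs ≠ "" ∧ vs ≠ "—"
                 then (PySem.Dict.mk [("peer_id",p),("name",n),("username",u'),("status",s),("role",r)]).insert "status" vs
                 else PySem.Dict.mk [("peer_id",p),("name",n),("username",u'),("status",s),("role",r)])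
              = PySem.Dict.mk [("peer_id",p),("name",n),("username",u'),("status", pvFill1 pvCandS s it),("role",r)] := by
        rw [gs]
        unfold pvFill1
        rw [hvs]
        by_cases h : s = "—" ∧ vs ≠ "" ∧ vs ≠ "—"
        · rw [if_pos ⟨congrArg some h.1, h.2⟩, if_pos h, ist]
        · rw [if_neg (fun hh => h ⟨Option.some.inj hh.1, hh.2⟩), if_neg h]
      simp only [eS]
  · -- role present
    rename_i vr
    dsimp only
    have hvr : pvCandR it = vr := by
      unfold pvCandR; rw [PySem.Dict.getD_eq_get?_getD, hR]; rfl
    have eR : (if (PySem.Dict.mk [("peer_id",p),("name",n),("username",u'),("status",s),("role",r)]).get? "role" = some "—" ∧ vr ≠ "" ∧ vr ≠ "—"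
               then (PySem.Dict.mk [("peer_id",p),("name",n),("username",u'),("status",s),("role",r)]).insert "role" vr
               else PySem.Dict.mk [("peer_id",p),("name",n),("username",u'),("status",s),("role",r)])
            = PySem.Dict.mk [("peer_id",p),("name",n),("username",u'),("status",s),("role", pvFill1 pvCandR r it)] := by
      rw [gr]
      unfold pvFill1
      rw [hvr]
      by_cases h : r = "—" ∧ vr ≠ "" ∧ vr ≠ "—"
      · rw [if_pos ⟨congrArg some h.1, h.2⟩, if_pos h, ir]
      · rw [if_neg (fun hh => h ⟨Option.some.inj hh.1, hh.2⟩), if_neg h]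
    simp only [eR]
    generalize pvFill1 pvCandR r it = r'
    cases hS : (PySem.Dict.mk it).get? "status"
    · dsimp only
      have hs0 : pvFill1 pvCandS s it = s := by
        unfold pvFill1
        rw [if_neg]
        rintro ⟨-, h1, -⟩
        exact h1 (by unfold pvCandS; rw [PySem.Dict.getD_eq_get?_getD, hS]; rfl)
      rw [hs0]
    · rename_i vs
      dsimp only
      have hvs : pvCandS it = vs := by
        unfold pvCandS; rw [PySem.Dict.getD_eq_get?_getD, hS]; rfl
      have eS : (if (PySem.Dict.mk [("peer_id",p),("name",n),("username",u'),("status",s),("role",r')]).get? "status" = some "—" ∧ vs ≠ "" ∧ vs ≠ "—"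
                 then (PySem.Dict.mk [("peer_id",p),("name",n),("username",u'),("status",s),("role",r')]).insert "status" vs
                 else PySem.Dict.mk [("peer_id",p),("name",n),("username",u'),("status",s),("role",r')])
              = PySem.Dict.mk [("peer_id",p),("name",n),("username",u'),("status", pvFill1 pvCandS s it),("role",r')] := by
        rw [gs]
        unfold pvFill1
        rw [hvs]
        by_cases h : s = "—" ∧ vs ≠ "" ∧ vs ≠ "—"
        · rw [if_pos ⟨congrArg some h.1, h.2⟩, if_pos h, ist]
        · rw [if_neg (fun hh => h ⟨Option.some.inj hh.1, hh.2⟩), if_neg h]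
      simp only [eS]

theorem foldl_pvFillA_mk5 (rest : List (List (String × String))) :
    ∀ (p n u s r : String),
    rest.foldl pvFillA (PySem.Dict.mk [("peer_id", p), ("name", n), ("username", u), ("status", s), ("role", r)]) =
      PySem.Dict.mk [("peer_id", p), ("name", n), ("username", rest.foldl (pvFill1 pvCandU) u),
                     ("status", rest.foldl (pvFill1 pvCandS) s), ("role", rest.foldl (pvFill1 pvCandR) r)] := by
  induction rest with
  | nil => intro p n u s r; rfl
  | cons x tl ih =>
    intro p n u s r
    rw [List.foldl_cons, pvFillA_mk5, ih]
    rfl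

-- folding the fill = taking the first acceptable candidate (Source B's _pick)
theorem foldl_pvFill1_eq_pick (cand : List (String × String) → String) :
    ∀ (l : List (List (String × String))) (v : String),
    l.foldl (pvFill1 cand) v = pvPickB v (l.map cand) := by
  intro l
  induction l with
  | nil =>
    intro v
    by_cases hv : v = "—" <;> simp [pvPickB, hv]
  | cons x tl ih =>
    intro v
    by_cases hv : v = "—"
    · subst hv
      by_cases hx : cand x ≠ "" ∧ cand x ≠ "—"
      · rw [List.foldl_cons, show pvFill1 cand "—" x = cand x from by simp [pvFill1, hx], ih]
        simp [pvPickB, hx.1, hx.2]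
      · rw [List.foldl_cons, show pvFill1 cand "—" x = "—" from by
            simp only [pvFill1]; rw [if_neg]; rintro ⟨-, h1, h2⟩; exact hx ⟨h1, h2⟩, ih]
        have : (cand x != "" && cand x != "—") = false := by
          by_cases h1 : cand x = "" <;> by_cases h2 : cand x = "—" <;> simp [h1, h2] at hx ⊢
        simp [pvPickB, this]
    · rw [List.foldl_cons, show pvFill1 cand v x = v from by simp [pvFill1, hv], ih]
      simp [pvPickB, hv]

-- B's one-shot record for a group = items of A's fold over that group
theorem pvRecB_eq_pvFold (first : List (String × String)) (rest : List (List (String × String))) :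
    pvRecB first rest = (pvFold (first :: rest)).items := by
  show pvRecB first rest = (rest.foldl pvFillA (pvInitA first)).items
  rw [show pvInitA first = PySem.Dict.mk [("peer_id", _), ("name", _), ("username", _), ("status", _), ("role", _)] from rfl,
    foldl_pvFillA_mk5]
  simp only [pvRecB, foldl_pvFill1_eq_pick]
  rfl

-- group of keyed pairs = keyed group of plain items
theorem keyed_filter (members : List (List (String × String))) (c : String) :
    (members.map (fun it => (pvKeyA it, it))).filter (fun p => p.1 == c) =
      (members.filter (fun it => pvKeyA it == c)).map (fun it => (pvKeyA it, it)) := by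
  rw [List.filter_map]
  rfl

theorem pvGroupMerge_eq (members : List (List (String × String))) (c : String)
    (h : c ∈ members.map pvKeyA) :
    pvGroupMerge ((members.map (fun it => (pvKeyA it, it))).filter (fun p => p.1 == c)) =
      (pvFold (members.filter (fun it => pvKeyA it == c))).items := by
  rw [keyed_filter]
  cases hg : members.filter (fun it => pvKeyA it == c) with
  | nil => exact absurd hg (filter_key_ne_nil members c h)
  | cons f r =>
    simp only [List.map_cons, pvGroupMerge, List.map_map]
    rw [pvRecB_eq_pvFold]
    have hr : List.map (Prod.snd ∘ fun it => (pvKeyA it, it)) r = r := by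
      simp [Function.comp_def]
    rw [hr]

-- ===== VERDICT (by name: the statement is the Claim_ definition above) =====
theorem dedupe_members_py_spec : Claim_equal_dedupe_members_py := by
  intro members _
  show dedupe_members_py members = dedupe_members_py_alt members
  show (members.foldl pvStepA (PySem.Dict.empty, [])).2.map
        (fun key => (((members.foldl pvStepA (PySem.Dict.empty, [])).1.get? key).getD
          PySem.Dict.empty).items)
      = pvLoopB [] (members.map (fun it => (pvKeyB it, it)))
  obtain ⟨ho, hm⟩ := pvA_inv members
  rw [ho, pvLoopB_eq, pvKeyBA]
  have hfst : (members.map (fun it => (pvKeyA it, it))).map Prod.fst = members.map pvKeyA := by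
    simp [Function.comp_def]
  rw [hfst, pvNewKeys_nil_eq_ofList]
  apply List.map_congr_left
  intro c hc
  have hc' : c ∈ members.map pvKeyA := (PySem.Set.mem_ofList _ _).mp hc
  rw [hm c, if_pos hc', Option.getD_some, pvGroupMerge_eq members c hc']
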